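-- pv_equiv track=rewrite | github.com/titusbspgit/SemiTestSuite | automation/json_to_xlsx.py | headers_union_preserve
-- ===== SOURCE A (Python) =====
-- def headers_union_preserve(rows):
--     if not rows:
--         raise ValueError("Empty JSON after parsing")
--     headers = list(rows[0].keys())
--     seen = set(headers)
--     for r in rows[1:]:
--         for k in r.keys():
--             if k not in seen:
--                 headers.append(k)
--                 seen.add(k)
--     return headers
-- ===== SOURCE B (Python) =====
-- def headers_union_preserve(rows):
--     if not rows:
--         raise ValueError("Empty JSON after parsing")
--     # tail-first merge: fold the rows from the back, each step rebuilding the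
--     # union as this row's keys followed by the later keys not among them
--     out = []
--     for r in reversed(rows):
--         head = list(r.keys())
--         hs = set(head)
--         out = head + [k for k in out if k not in hs]
--     return out
-- ===== Notes on version B (the rewrite author's own statement) =====
-- stated objective: alternative
-- what changed: Replaces A's forward single pass with a persistent seen-set and in-place appends by a backward fold over the rows that rebuilds the union at each step as the current row's keys followed by the later-seen keys not among them (no accumulated seen state, opposite traversal direction).
import Mathlib
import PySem

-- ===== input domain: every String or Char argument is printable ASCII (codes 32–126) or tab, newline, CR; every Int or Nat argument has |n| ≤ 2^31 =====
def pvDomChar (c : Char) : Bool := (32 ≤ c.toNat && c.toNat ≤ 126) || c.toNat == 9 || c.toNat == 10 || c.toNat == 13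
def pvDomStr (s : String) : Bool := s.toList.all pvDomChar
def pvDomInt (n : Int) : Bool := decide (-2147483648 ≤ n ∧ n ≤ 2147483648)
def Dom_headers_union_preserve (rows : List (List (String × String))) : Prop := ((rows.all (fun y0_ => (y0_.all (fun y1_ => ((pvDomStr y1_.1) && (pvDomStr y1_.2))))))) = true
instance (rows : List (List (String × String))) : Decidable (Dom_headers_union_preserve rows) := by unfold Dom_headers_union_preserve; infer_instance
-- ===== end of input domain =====

-- B replaces A's forward pass with seen-set and appends by a backward fold that at each
-- row rebuilds the union as that row's keys followed by the later keys not among them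
-- (objective: alternative).

-- r.keys() of a dict given as an association list: the distinct keys, first-insertion order (exact dict semantics)
def pyKeys (r : List (String × String)) : List String := PySem.List.dedup (r.map Prod.fst)

-- ===== PORT A =====
def headers_union_preserve (rows : List (List (String × String))) : List String :=
  match rows with
  | [] => []  -- unreachable under Pre_: the Python raises ValueError here
  | r0 :: rest =>
    let headers := pyKeys r0                                -- list(rows[0].keys())
    let seen : PySem.Set String := PySem.Set.ofList headers -- set(headers)
    let st := rest.foldl (fun (st : List String × PySem.Set String) r =>
        (pyKeys r).foldl (fun st k =>
          if st.2.contains k then st else (st.1 ++ [k], PySem.Set.add st.2 k)) st)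
      (headers, seen)
    st.1

-- ===== PORT B =====
-- the backward loop 'for r in reversed(rows)' with accumulator out is a foldr over rows
def headers_union_preserve_alt (rows : List (List (String × String))) : List String :=
  rows.foldr (fun r out =>
    let head := pyKeys r
    let hs : PySem.Set String := PySem.Set.ofList head
    head ++ out.filter (fun k => !hs.contains k)) []
  -- (the Python raises ValueError on rows = []; excluded by Pre_)

-- ===== PRECONDITION & SPEC =====
-- Pre_ excludes rows = [], where the Python A raises ValueError (B raises too).
def Pre_headers_union_preserve (rows : List (List (String × String))) : Prop := rows ≠ []
instance (rows : List (List (String × String))) : Decidable (Pre_headers_union_preserve rows) := by unfold Pre_headers_union_preserve; infer_instance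
def pvWitness_headers_union_preserve : (List (List (String × String))) := [[("a", "1")]]

def Spec_headers_union_preserve (rows : List (List (String × String))) (out : List String) : Prop := out = headers_union_preserve_alt rows
instance (rows : List (List (String × String))) (out : List String) : Decidable (Spec_headers_union_preserve rows out) := by unfold Spec_headers_union_preserve; infer_instance

-- ===== CLAIM (what is proved, stated in full; the proofs are below) =====
def Claim_equal_headers_union_preserve : Prop := ∀ (rows : List (List (String × String))), Dom_headers_union_preserve rows → Pre_headers_union_preserve rows → Spec_headers_union_preserve rows (headers_union_preserve rows)

-- ===== LEMMAS AND PROOFS =====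

-- A's inner loop from a synchronized (headers, seen) pair is Set.update in both components
lemma inner_loop_eq (ks : List String) (s : PySem.Set String) :
    ks.foldl (fun (st : List String × PySem.Set String) k =>
      if st.2.contains k then st else (st.1 ++ [k], PySem.Set.add st.2 k)) (s, s)
    = (PySem.Set.update s ks, PySem.Set.update s ks) := by
  induction ks generalizing s with
  | nil => simp [PySem.Set.update]
  | cons k ks ih =>
    simp only [List.foldl_cons, PySem.Set.update_cons]
    by_cases h : k ∈ s
    · rw [show (if PySem.Set.contains s k then (s, s)
          else (s ++ [k], PySem.Set.add s k)) = (s, s) by simp [h],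
        PySem.Set.add_of_mem h, ih]
    · rw [show (if PySem.Set.contains s k then (s, s)
          else (s ++ [k], PySem.Set.add s k)) = (PySem.Set.add s k, PySem.Set.add s k) by
            simp [h],
        ih]

-- A's outer loop from a synchronized pair is Set.update by the flattened key stream
lemma outer_loop_eq (rs : List (List (String × String))) (s : PySem.Set String) :
    rs.foldl (fun (st : List String × PySem.Set String) r =>
      (pyKeys r).foldl (fun st k =>
        if st.2.contains k then st else (st.1 ++ [k], PySem.Set.add st.2 k)) st) (s, s)
    = (PySem.Set.update s (rs.flatMap pyKeys), PySem.Set.update s (rs.flatMap pyKeys)) := by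
  induction rs generalizing s with
  | nil => simp [PySem.Set.update]
  | cons r rs ih =>
    simp only [List.foldl_cons, List.flatMap_cons, PySem.Set.update_append]
    rw [inner_loop_eq, ih]

lemma ofList_pyKeys (r : List (String × String)) :
    PySem.Set.ofList (pyKeys r) = pyKeys r := by
  simp [pyKeys, PySem.List.dedup_eq_ofList, PySem.Set.ofList_ofList]

-- B's backward merge computes the ordered dedup of the flattened key stream
lemma alt_eq (rs : List (List (String × String))) :
    headers_union_preserve_alt rs = PySem.Set.ofList (rs.flatMap pyKeys) := by
  induction rs with
  | nil => simp [headers_union_preserve_alt, PySem.Set.ofList]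
  | cons r rest ih =>
    simp only [headers_union_preserve_alt, List.foldr_cons, List.flatMap_cons,
      PySem.Set.ofList_append] at ih ⊢
    rw [ih, PySem.Set.update_eq_append_filter, ofList_pyKeys]

-- ===== VERDICT (by name: the statement is the Claim_ definition above) =====
theorem headers_union_preserve_spec : Claim_equal_headers_union_preserve := by
  intro rows _ hpre
  unfold Spec_headers_union_preserve headers_union_preserve
  match rows with
  | [] => exact absurd rfl hpre
  | r0 :: rest =>
    simp only
    rw [ofList_pyKeys, outer_loop_eq, alt_eq]
    simp only [List.flatMap_cons, PySem.Set.ofList_append, ofList_pyKeys]
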